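-- pv_equiv track=rewrite | github.com/MrWhok/SteganographyResearch | Algo.py | _iterate_image
-- ===== SOURCE A (Python) =====
-- def _iterate_image(X_flatten, Payload, KEY, cp_x1, cp_x2):
--     payload_index = 0  # Initialize payload index
--     for i in range(len(X_flatten)):
--         if payload_index < len(Payload):
--             if X_flatten[i] < 4 or X_flatten[i] > 251:
--                 KEY[i] = 3
--                 cp_x1[i] = X_flatten[i]
--                 cp_x2[i] = X_flatten[i]
--             else:
--                 Temp = Payload[payload_index] // 2
--                 if Payload[payload_index] % 2 == 0:  # If the payload is even
--                     KEY[i] = 2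
--                     cp_x1[i] = X_flatten[i] + Temp
--                     cp_x2[i] = X_flatten[i] - Temp
--                 elif Payload[payload_index] % 2 == 1:  # If the payload is odd
--                     KEY[i] = 1
--                     cp_x1[i] = X_flatten[i] + Temp
--                     cp_x2[i] = X_flatten[i] - Temp
--                 payload_index += 1  # Increment payload index
--         else:
--             KEY[i] = 3
--             cp_x1[i] = X_flatten[i]
--             cp_x2[i] = X_flatten[i]
--     return KEY, cp_x1, cp_x2
-- ===== SOURCE B (Python) =====
-- def _iterate_image(X_flatten, Payload, KEY, cp_x1, cp_x2):
--     # Two-phase: precompute the embeddable positions, pair them with the payload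
--     # in a dict, then build all three output rows in one table-driven pass.
--     n = len(X_flatten)
--     emb = [i for i, x in enumerate(X_flatten) if 4 <= x <= 251]
--     pairs = dict(zip(emb, Payload))
--
--     def cell(i, x):
--         if i in pairs:
--             p = pairs[i]
--             t = p // 2
--             return (2 if p % 2 == 0 else 1, x + t, x - t)
--         return (3, x, x)
--
--     rows = [cell(i, x) for i, x in enumerate(X_flatten)]
--     KEY[:n] = [r[0] for r in rows]
--     cp_x1[:n] = [r[1] for r in rows]
--     cp_x2[:n] = [r[2] for r in rows]
--     return KEY, cp_x1, cp_x2
-- ===== Notes on version B (the rewrite author's own statement) =====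
-- stated objective: alternative
-- what changed: Replaces A's single stateful pass with a mutable payload cursor by a two-phase decomposition: precompute the embeddable positions, pair them with the payload in a dict, then build all three output rows in one table-driven pass.
import Mathlib
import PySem

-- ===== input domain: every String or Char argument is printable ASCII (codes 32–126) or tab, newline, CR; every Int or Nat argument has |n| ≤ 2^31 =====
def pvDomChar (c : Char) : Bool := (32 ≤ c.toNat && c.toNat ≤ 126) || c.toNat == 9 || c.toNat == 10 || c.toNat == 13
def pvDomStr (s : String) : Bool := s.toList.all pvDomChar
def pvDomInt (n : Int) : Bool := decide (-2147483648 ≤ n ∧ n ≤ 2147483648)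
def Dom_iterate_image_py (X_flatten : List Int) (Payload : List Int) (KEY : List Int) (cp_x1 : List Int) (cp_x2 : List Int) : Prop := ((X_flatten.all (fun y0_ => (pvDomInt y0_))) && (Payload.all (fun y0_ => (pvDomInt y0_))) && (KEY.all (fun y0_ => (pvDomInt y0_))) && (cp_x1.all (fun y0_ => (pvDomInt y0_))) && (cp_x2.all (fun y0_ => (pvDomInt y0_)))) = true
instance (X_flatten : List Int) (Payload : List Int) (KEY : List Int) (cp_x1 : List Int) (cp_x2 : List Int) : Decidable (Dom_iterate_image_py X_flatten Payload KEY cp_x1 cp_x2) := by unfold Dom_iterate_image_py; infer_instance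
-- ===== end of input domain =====

-- B replaces A's single stateful pass (payload cursor mutated while scanning) by a two-phase
-- decomposition: precompute the embeddable positions, pair them with the payload in a dict, then
-- build the three output rows in one table-driven pass. In Python both A and B mutate KEY/cp_x1/
-- cp_x2 in place; the equivalence proved here is about the RETURN value.

-- ===== PORT A =====
-- literal transliteration of A's indexed loop; the loop state (payload_index, KEY, cp_x1, cp_x2)
-- is carried through the recursion.  X_flatten[i] is accessed with getD under the guard i < length
-- (always in range); KEY[i] = v is List.set (Pre_ excludes ¬(length ≤), where Python raises IndexError).
def pvALoop (X P : List Int) (i pidx : Nat) (K c1 c2 : List Int) : List Int × List Int × List Int :=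
  if h : i < X.length then
    if pidx < P.length then
      if X.getD i 0 < 4 ∨ X.getD i 0 > 251 then
        pvALoop X P (i+1) pidx (K.set i 3) (c1.set i (X.getD i 0)) (c2.set i (X.getD i 0))
      else
        if PySem.Int.mod (P.getD pidx 0) 2 = 0 then
          pvALoop X P (i+1) (pidx+1) (K.set i 2)
            (c1.set i (X.getD i 0 + PySem.Int.floordiv (P.getD pidx 0) 2))
            (c2.set i (X.getD i 0 - PySem.Int.floordiv (P.getD pidx 0) 2))
        else if PySem.Int.mod (P.getD pidx 0) 2 = 1 then
          pvALoop X P (i+1) (pidx+1) (K.set i 1)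
            (c1.set i (X.getD i 0 + PySem.Int.floordiv (P.getD pidx 0) 2))
            (c2.set i (X.getD i 0 - PySem.Int.floordiv (P.getD pidx 0) 2))
        else pvALoop X P (i+1) (pidx+1) K c1 c2
    else pvALoop X P (i+1) pidx (K.set i 3) (c1.set i (X.getD i 0)) (c2.set i (X.getD i 0))
  else (K, c1, c2)
termination_by X.length - i

def iterate_image_py (X_flatten : List Int) (Payload : List Int) (KEY : List Int) (cp_x1 : List Int) (cp_x2 : List Int) : List Int × List Int × List Int :=
  pvALoop X_flatten Payload 0 0 KEY cp_x1 cp_x2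

-- ===== PORT B =====
-- cell(i, x) of Source B: look the index up in the precomputed (position, payload) pairs
def pvCell (pairs : List (Int × Int)) (ix : Int × Int) : Int × Int × Int :=
  match List.lookup ix.1 pairs with
  | some p => ((if PySem.Int.mod p 2 = 0 then 2 else 1),
               ix.2 + PySem.Int.floordiv p 2, ix.2 - PySem.Int.floordiv p 2)
  | none => (3, ix.2, ix.2)

-- dict(zip(emb, Payload)) has distinct keys, so it is the association list emb.zip Payload;
-- KEY[:n] = new  is  new ++ KEY.drop n  (KEY has every index < n overwritten)
def pvRowsB (X_flatten : List Int) (Payload : List Int) : List (Int × Int × Int) :=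
  (PySem.List.enumerate X_flatten).map
    (pvCell ((((PySem.List.enumerate X_flatten).filter (fun ix => decide (4 ≤ ix.2 ∧ ix.2 ≤ 251))).map Prod.fst).zip Payload))

def iterate_image_py_alt (X_flatten : List Int) (Payload : List Int) (KEY : List Int) (cp_x1 : List Int) (cp_x2 : List Int) : List Int × List Int × List Int :=
  ((pvRowsB X_flatten Payload).map (·.1) ++ KEY.drop X_flatten.length,
   (pvRowsB X_flatten Payload).map (·.2.1) ++ cp_x1.drop X_flatten.length,
   (pvRowsB X_flatten Payload).map (·.2.2) ++ cp_x2.drop X_flatten.length)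

-- ===== PRECONDITION & SPEC =====
-- A writes KEY[i], cp_x1[i], cp_x2[i] for every i < len(X_flatten): it raises IndexError exactly
-- when one of the three output lists is shorter than X_flatten; Pre_ excludes exactly that.
def Pre_iterate_image_py (X_flatten : List Int) (Payload : List Int) (KEY : List Int) (cp_x1 : List Int) (cp_x2 : List Int) : Prop :=
  X_flatten.length ≤ KEY.length ∧ X_flatten.length ≤ cp_x1.length ∧ X_flatten.length ≤ cp_x2.length
instance (X_flatten : List Int) (Payload : List Int) (KEY : List Int) (cp_x1 : List Int) (cp_x2 : List Int) : Decidable (Pre_iterate_image_py X_flatten Payload KEY cp_x1 cp_x2) := by unfold Pre_iterate_image_py; infer_instance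

def pvWitness_iterate_image_py : List Int × List Int × List Int × List Int × List Int :=
  ([5, 1, 300], [3, 4], [0, 0, 0], [0, 0, 0], [0, 0, 0])

def Spec_iterate_image_py (X_flatten : List Int) (Payload : List Int) (KEY : List Int) (cp_x1 : List Int) (cp_x2 : List Int) (out : List Int × List Int × List Int) : Prop := out = iterate_image_py_alt X_flatten Payload KEY cp_x1 cp_x2
instance (X_flatten : List Int) (Payload : List Int) (KEY : List Int) (cp_x1 : List Int) (cp_x2 : List Int) (out : List Int × List Int × List Int) : Decidable (Spec_iterate_image_py X_flatten Payload KEY cp_x1 cp_x2 out) := by unfold Spec_iterate_image_py; infer_instance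

-- ===== CLAIM (what is proved, stated in full; the proofs are below) =====
def Claim_equal_iterate_image_py : Prop := ∀ (X_flatten : List Int) (Payload : List Int) (KEY : List Int) (cp_x1 : List Int) (cp_x2 : List Int), Dom_iterate_image_py X_flatten Payload KEY cp_x1 cp_x2 → Pre_iterate_image_py X_flatten Payload KEY cp_x1 cp_x2 → Spec_iterate_image_py X_flatten Payload KEY cp_x1 cp_x2 (iterate_image_py X_flatten Payload KEY cp_x1 cp_x2)

-- ===== LEMMAS AND PROOFS =====

-- the common row description: one output triple per pixel, consuming the payload at embeddable pixels
def pvRows : List Int → List Int → List (Int × Int × Int)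
  | [], _ => []
  | x :: xs, pl =>
    if 4 ≤ x ∧ x ≤ 251 then
      match pl with
      | p :: pl' => ((if PySem.Int.mod p 2 = 0 then 2 else 1),
                     x + PySem.Int.floordiv p 2, x - PySem.Int.floordiv p 2) :: pvRows xs pl'
      | [] => (3, x, x) :: pvRows xs []
    else (3, x, x) :: pvRows xs pl

theorem pvRows_nil_payload (x : Int) (xs : List Int) :
    pvRows (x :: xs) [] = (3, x, x) :: pvRows xs [] := by
  by_cases h : 4 ≤ x ∧ x ≤ 251 <;> simp [pvRows, h]

theorem pv_take_set (l : List Int) (i : Nat) (v : Int) (h : i < l.length) :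
    (l.set i v).take (i+1) = l.take i ++ [v] := by
  rw [List.set_eq_take_append_cons_drop, if_pos h]
  rw [show i + 1 = (l.take i).length + 1 by simp [List.length_take_of_le (Nat.le_of_lt h)],
      List.take_append]
  simp

theorem pv_lookup_ne (k a b : Int) (l : List (Int × Int)) (h : k ≠ a) :
    List.lookup k ((a, b) :: l) = List.lookup k l := by
  have hb : (k == a) = false := beq_eq_false_iff_ne.mpr h
  simp [List.lookup, hb]

theorem pv_lookup_none (k : Int) (l : List (Int × Int)) (h : ∀ a ∈ l, a.1 ≠ k) :
    List.lookup k l = none := by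
  induction l with
  | nil => rfl
  | cons a l ih =>
    obtain ⟨a1, a2⟩ := a
    rw [pv_lookup_ne k a1 a2 l (fun he => h (a1, a2) (by simp) (by simp [he]))]
    exact ih (fun b hb => h b (List.mem_cons_of_mem _ hb))

theorem pv_enum_fst_ge (xs : List Int) (s : Int) (ix : Int × Int)
    (h : ix ∈ PySem.List.enumerate xs s) : s ≤ ix.1 := by
  obtain ⟨k, hk, rfl⟩ := (PySem.List.mem_enumerate_iff xs s ix).mp h
  simp

-- every key of the (position, payload) association list built from pixels at offset s is ≥ s
theorem pv_zip_key_ge (xs : List Int) (s : Int) (P : List (Int)) (a : Int × Int)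
    (h : a ∈ (((PySem.List.enumerate xs s).filter (fun ix => decide (4 ≤ ix.2 ∧ ix.2 ≤ 251))).map Prod.fst).zip P) :
    s ≤ a.1 := by
  obtain ⟨a1, a2⟩ := a
  have h1 := (List.of_mem_zip h).1
  obtain ⟨ix, hix, rfl⟩ := List.mem_map.mp h1
  exact pv_enum_fst_ge xs s ix (List.mem_of_mem_filter hix)

-- B's single table-driven pass produces exactly the row description
theorem pvB_rows (X : List Int) : ∀ (P : List Int) (s : Int),
    (PySem.List.enumerate X s).map
      (pvCell ((((PySem.List.enumerate X s).filter (fun ix => decide (4 ≤ ix.2 ∧ ix.2 ≤ 251))).map Prod.fst).zip P))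
      = pvRows X P := by
  induction X with
  | nil => intro P s; simp [PySem.List.enumerate_nil, pvRows]
  | cons x xs ih =>
    intro P s
    rw [PySem.List.enumerate_cons]
    by_cases hx : 4 ≤ x ∧ x ≤ 251
    · rw [List.filter_cons_of_pos (by simpa using hx)]
      cases P with
      | nil =>
        simp only [List.zip_nil_right, List.map_cons]
        have hhead : pvCell [] (s, x) = (3, x, x) := by simp [pvCell, List.lookup]
        have htail := ih [] (s + 1)
        simp only [List.zip_nil_right] at htail
        rw [hhead, htail, pvRows_nil_payload]
      | cons p P' =>
        simp only [List.map_cons, List.zip_cons_cons]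
        have hhead : pvCell ((s, p) :: ((((PySem.List.enumerate xs (s+1)).filter (fun ix => decide (4 ≤ ix.2 ∧ ix.2 ≤ 251))).map Prod.fst).zip P')) (s, x)
            = ((if PySem.Int.mod p 2 = 0 then 2 else 1),
               x + PySem.Int.floordiv p 2, x - PySem.Int.floordiv p 2) := by
          simp [pvCell, List.lookup]
        rw [hhead]
        have htail : ∀ ix ∈ PySem.List.enumerate xs (s+1),
            pvCell ((s, p) :: ((((PySem.List.enumerate xs (s+1)).filter (fun ix => decide (4 ≤ ix.2 ∧ ix.2 ≤ 251))).map Prod.fst).zip P')) ix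
            = pvCell ((((PySem.List.enumerate xs (s+1)).filter (fun ix => decide (4 ≤ ix.2 ∧ ix.2 ≤ 251))).map Prod.fst).zip P') ix := by
          intro ix hix
          have hge := pv_enum_fst_ge xs (s+1) ix hix
          unfold pvCell
          rw [pv_lookup_ne ix.1 s p _ (by omega)]
        rw [List.map_congr_left htail, ih P' (s + 1)]
        simp [pvRows, hx]
    · rw [List.filter_cons_of_neg (by simpa using hx)]
      simp only [List.map_cons]
      have hhead : pvCell ((((PySem.List.enumerate xs (s+1)).filter (fun ix => decide (4 ≤ ix.2 ∧ ix.2 ≤ 251))).map Prod.fst).zip P) (s, x) = (3, x, x) := by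
        unfold pvCell
        rw [pv_lookup_none s _ (fun a ha => by have := pv_zip_key_ge xs (s+1) P a ha; omega)]
      rw [hhead, ih P (s + 1)]
      simp [pvRows, hx]

-- A's loop invariant: positions < i are already final, positions ≥ i are described by pvRows on
-- the remaining pixels and remaining payload; the tails beyond len(X) are never touched
theorem pvA_loop_eq (t : List Int) : ∀ (X P : List Int) (i pidx : Nat) (K c1 c2 : List Int),
    X.drop i = t → i ≤ X.length →
    X.length ≤ K.length → X.length ≤ c1.length → X.length ≤ c2.length →
    pvALoop X P i pidx K c1 c2 =
      (K.take i ++ (pvRows t (P.drop pidx)).map (·.1) ++ K.drop X.length,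
       c1.take i ++ (pvRows t (P.drop pidx)).map (·.2.1) ++ c1.drop X.length,
       c2.take i ++ (pvRows t (P.drop pidx)).map (·.2.2) ++ c2.drop X.length) := by
  induction t with
  | nil =>
    intro X P i pidx K c1 c2 hdrop hi hK hc1 hc2
    have hlen : X.length ≤ i := by
      have := List.drop_eq_nil_iff.mp hdrop; omega
    have hieq : i = X.length := by omega
    rw [pvALoop, dif_neg (by omega)]
    simp [pvRows, hieq, List.take_append_drop]
  | cons x t' ih =>
    intro X P i pidx K c1 c2 hdrop hi hK hc1 hc2
    have hilt : i < X.length := by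
      by_contra hc
      rw [List.drop_eq_nil_iff.mpr (by omega)] at hdrop
      simp at hdrop
    have hX : X.drop i = X[i] :: X.drop (i+1) := List.drop_eq_getElem_cons hilt
    rw [hX] at hdrop
    have hx : X[i] = x := (List.cons.injEq _ _ _ _ ▸ hdrop).1
    have ht' : X.drop (i+1) = t' := (List.cons.injEq _ _ _ _ ▸ hdrop).2
    have hgetD : X.getD i 0 = x := by
      rw [List.getD_eq_getElem?_getD, List.getElem?_eq_getElem hilt]; simp [hx]
    rw [pvALoop, dif_pos hilt]
    simp only [hgetD]
    by_cases hp : pidx < P.length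
    · rw [if_pos hp]
      by_cases hx4 : x < 4 ∨ x > 251
      · rw [if_pos hx4]
        rw [ih X P (i+1) pidx _ _ _ ht' (by omega) (by simpa using hK) (by simpa using hc1) (by simpa using hc2)]
        have hcond : ¬ (4 ≤ x ∧ x ≤ 251) := by omega
        simp only [pvRows, if_neg hcond, List.map_cons]
        rw [pv_take_set K i 3 (by omega), pv_take_set c1 i x (by omega), pv_take_set c2 i x (by omega),
            List.drop_set_of_lt (by omega), List.drop_set_of_lt (by omega), List.drop_set_of_lt (by omega)]
        simp
      · rw [if_neg hx4]
        have hcond : 4 ≤ x ∧ x ≤ 251 := by omega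
        have hpd : P.drop pidx = P[pidx] :: P.drop (pidx+1) := List.drop_eq_getElem_cons hp
        have hPget : P.getD pidx 0 = P[pidx] := by
          rw [List.getD_eq_getElem?_getD, List.getElem?_eq_getElem hp]; simp
        rcases PySem.Int.mod_two_eq (P[pidx]) with hm | hm
        · rw [if_pos (by rw [hPget]; exact hm)]
          rw [ih X P (i+1) (pidx+1) _ _ _ ht' (by omega) (by simpa using hK) (by simpa using hc1) (by simpa using hc2)]
          simp only [hpd, pvRows, if_pos hcond, List.map_cons, hPget]
          rw [show (if PySem.Int.mod P[pidx] 2 = 0 then (2:Int) else 1) = 2 from by rw [hm]; norm_num]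
          rw [pv_take_set K i 2 (by omega),
              pv_take_set c1 i (x + PySem.Int.floordiv P[pidx] 2) (by omega),
              pv_take_set c2 i (x - PySem.Int.floordiv P[pidx] 2) (by omega),
              List.drop_set_of_lt (by omega), List.drop_set_of_lt (by omega), List.drop_set_of_lt (by omega)]
          simp
        · rw [if_neg (by rw [hPget, hm]; norm_num), if_pos (by rw [hPget]; exact hm)]
          rw [ih X P (i+1) (pidx+1) _ _ _ ht' (by omega) (by simpa using hK) (by simpa using hc1) (by simpa using hc2)]
          simp only [hpd, pvRows, if_pos hcond, List.map_cons, hPget]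
          rw [show (if PySem.Int.mod P[pidx] 2 = 0 then (2:Int) else 1) = 1 from by rw [hm]; norm_num]
          rw [pv_take_set K i 1 (by omega),
              pv_take_set c1 i (x + PySem.Int.floordiv P[pidx] 2) (by omega),
              pv_take_set c2 i (x - PySem.Int.floordiv P[pidx] 2) (by omega),
              List.drop_set_of_lt (by omega), List.drop_set_of_lt (by omega), List.drop_set_of_lt (by omega)]
          simp
    · rw [if_neg hp]
      have hpd : P.drop pidx = [] := List.drop_eq_nil_iff.mpr (by omega)
      rw [ih X P (i+1) pidx _ _ _ ht' (by omega) (by simpa using hK) (by simpa using hc1) (by simpa using hc2)]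
      simp only [hpd, pvRows_nil_payload, List.map_cons]
      rw [pv_take_set K i 3 (by omega), pv_take_set c1 i x (by omega), pv_take_set c2 i x (by omega),
          List.drop_set_of_lt (by omega), List.drop_set_of_lt (by omega), List.drop_set_of_lt (by omega)]
      simp

-- ===== VERDICT (by name: the statement is the Claim_ definition above) =====
theorem iterate_image_py_spec : Claim_equal_iterate_image_py := by
  intro X P K c1 c2 _hdom hpre
  obtain ⟨hK, hc1, hc2⟩ := hpre
  unfold Spec_iterate_image_py iterate_image_py iterate_image_py_alt pvRowsB
  rw [pvA_loop_eq X X P 0 0 K c1 c2 List.drop_zero (by omega) hK hc1 hc2]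
  rw [pvB_rows X P 0]
  simp
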